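-- pv_equiv track=rewrite | github.com/DCMLab/music-generation-challenge-2021 | code/nontree-version/actions.py | move_in_scale
-- ===== SOURCE A (Python) =====
-- def move_in_scale(start_pitch, scale, step):
--     current_pitch = start_pitch
--     sign = int(step / abs(step))
--     while step != 0:
--         current_pitch = current_pitch + sign
--         if current_pitch % 12 in scale:
--             step = step - sign
--     return current_pitch
-- ===== SOURCE B (Python) =====
-- def move_in_scale(start_pitch, scale, step):
--     # scale tones of one octave, in increasing order (only residues 0..11 can ever match p % 12)
--     tones = [r for r in range(12) if r in scale]
--     k = len(tones)
--
--     def rank(p):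
--         # number of scale tones <= p
--         q, r = divmod(p, 12)
--         c = 0
--         for t in tones:
--             if t <= r:
--                 c += 1
--         return q * k + c
--
--     def tone_at(i):
--         # the scale tone with rank i + 1
--         q, r = divmod(i, k)
--         return 12 * q + tones[r]
--
--     if step > 0:
--         return tone_at(rank(start_pitch) + step - 1)
--     else:
--         return tone_at(rank(start_pitch - 1) + step)
-- ===== Notes on version B (the rewrite author's own statement) =====
-- stated objective: faster
-- what changed: Replaces the semitone-by-semitone while loop (12 scans of scale per scale degree moved) by a closed-form rank/unrank computation over the precomputed sorted in-octave scale tones: the answer is the tone of rank rank(start)+step (resp. rank(start-1)+step downward), found by one divmod and an O(12) lookup.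
import Mathlib
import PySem

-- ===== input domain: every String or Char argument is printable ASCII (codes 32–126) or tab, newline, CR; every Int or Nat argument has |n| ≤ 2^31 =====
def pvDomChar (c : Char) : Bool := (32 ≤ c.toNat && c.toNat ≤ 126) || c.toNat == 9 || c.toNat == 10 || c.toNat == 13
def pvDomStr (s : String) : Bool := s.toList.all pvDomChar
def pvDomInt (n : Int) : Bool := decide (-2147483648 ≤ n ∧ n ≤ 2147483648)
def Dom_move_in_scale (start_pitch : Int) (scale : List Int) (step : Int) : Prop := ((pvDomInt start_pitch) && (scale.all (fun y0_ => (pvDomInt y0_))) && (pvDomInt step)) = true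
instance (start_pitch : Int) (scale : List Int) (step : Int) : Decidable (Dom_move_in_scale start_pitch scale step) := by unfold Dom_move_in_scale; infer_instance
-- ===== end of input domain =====

-- B replaces A's semitone-by-semitone while loop by a closed-form rank/unrank
-- computation over the sorted in-octave scale tones (objective: faster).


-- ===== PORT A =====
-- A's while loop, one semitone per iteration, transliterated with fuel.
-- Under Pre_ the fuel 12*|step|+1 is more than the number of iterations the
-- Python loop performs (proved below), so the fuel-out branch is never taken.
def pvLoopA (scale : List Int) (sign : Int) : Nat → Int → Int → Int
  | 0, p, _ => p
  | fuel+1, p, s =>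
    if s = 0 then p
    else
      let p' := p + sign
      pvLoopA scale sign fuel p' (if PySem.Int.mod p' 12 ∈ scale then s - sign else s)

def move_in_scale (start_pitch : Int) (scale : List Int) (step : Int) : Int :=
  -- sign = int(step / abs(step)): exactly the sign of step when step ≠ 0
  -- (step = 0 raises ZeroDivisionError in Python; excluded by Pre_)
  let sign : Int := if 0 < step then 1 else -1
  pvLoopA scale sign (12 * step.natAbs + 1) start_pitch step

-- ===== PORT B =====
-- tones = [r for r in range(12) if r in scale]
def pvTones (scale : List Int) : List Int :=
  ((List.range 12).filter (fun r : Nat => decide ((r : Int) ∈ scale))).map (fun r : Nat => (r : Int))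

-- rank(p) = number of scale tones ≤ p
def pvRank (tones : List Int) (k : Int) (p : Int) : Int :=
  let q := PySem.Int.floordiv p 12
  let r := PySem.Int.mod p 12
  q * k + tones.foldl (fun c t => if t ≤ r then c + 1 else c) (0 : Int)

-- tone_at(i) = the scale tone of rank i+1; tones[r] is in range whenever
-- tones ≠ [] (k = 0 raises ZeroDivisionError in Python; excluded by Pre_)
def pvToneAt (tones : List Int) (k : Int) (i : Int) : Int :=
  let q := PySem.Int.floordiv i k
  let r := PySem.Int.mod i k
  12 * q + (PySem.List.pyGet? tones r).getD 0

def move_in_scale_alt (start_pitch : Int) (scale : List Int) (step : Int) : Int :=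
  let tones := pvTones scale
  let k : Int := tones.length
  if 0 < step then pvToneAt tones k (pvRank tones k start_pitch + step - 1)
  else pvToneAt tones k (pvRank tones k (start_pitch - 1) + step)

-- ===== PRECONDITION & SPEC =====
-- Pre_ excludes step = 0 (A raises ZeroDivisionError in 'int(step/abs(step))')
-- and scales with no tone in 0..11 (A's while loop never terminates there).
def Pre_move_in_scale (start_pitch : Int) (scale : List Int) (step : Int) : Prop :=
  step ≠ 0 ∧ ∃ r ∈ List.range 12, (r : Int) ∈ scale
instance (start_pitch : Int) (scale : List Int) (step : Int) : Decidable (Pre_move_in_scale start_pitch scale step) := by unfold Pre_move_in_scale; infer_instance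
def pvWitness_move_in_scale : Int × List Int × Int := (60, [0, 2, 4, 5, 7, 9, 11], 3)

def Spec_move_in_scale (start_pitch : Int) (scale : List Int) (step : Int) (out : Int) : Prop := out = move_in_scale_alt start_pitch scale step
instance (start_pitch : Int) (scale : List Int) (step : Int) (out : Int) : Decidable (Spec_move_in_scale start_pitch scale step out) := by unfold Spec_move_in_scale; infer_instance

-- ===== CLAIM (what is proved, stated in full; the proofs are below) =====
def Claim_equal_move_in_scale : Prop := ∀ (start_pitch : Int) (scale : List Int) (step : Int), Dom_move_in_scale start_pitch scale step → Pre_move_in_scale start_pitch scale step → Spec_move_in_scale start_pitch scale step (move_in_scale start_pitch scale step)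

-- ===== LEMMAS AND PROOFS =====

-- number of elements of T that are ≤ r
def pvCnt (T : List Int) (r : Int) : Nat := (T.filter (fun t => decide (t ≤ r))).length

theorem pvCnt_le_length (T : List Int) (r : Int) : pvCnt T r ≤ T.length :=
  List.length_filter_le _ _

-- the count characterizes positions in a strictly sorted list
theorem pvCnt_iff (T : List Int) (hS : T.Pairwise (· < ·)) (r : Int) :
    ∀ j (hj : j < T.length), (T[j] ≤ r ↔ j < pvCnt T r) := by
  induction T with
  | nil => intro j hj; simp at hj
  | cons a T ih =>
    intro j hj
    have ha : ∀ t ∈ T, a < t := (List.pairwise_cons.1 hS).1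
    have hS' : T.Pairwise (· < ·) := (List.pairwise_cons.1 hS).2
    by_cases har : a ≤ r
    · have : pvCnt (a :: T) r = pvCnt T r + 1 := by
        simp [pvCnt, List.filter_cons, har]
      rw [this]
      cases j with
      | zero => simpa using har
      | succ j =>
        have hj' : j < T.length := by simpa using hj
        simpa using (ih hS' j hj').trans (by omega)
    · have hall : ∀ t ∈ a :: T, ¬ t ≤ r := by
        intro t ht
        rcases List.mem_cons.1 ht with h | h
        · subst h; exact har
        · have := ha t h; omega
      have hfil : pvCnt (a :: T) r = 0 := by
        unfold pvCnt
        rw [List.filter_eq_nil_iff.2 (by intro t ht; simpa using hall t ht)]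
        rfl
      rw [hfil]
      constructor
      · intro hle
        exfalso
        have : a ≤ (a :: T)[j] := by
          cases j with
          | zero => simp
          | succ j =>
            have hj' : j < T.length := by simpa using hj
            have := ha (T[j]) (List.getElem_mem hj')
            simpa using this.le
        omega
      · omega

theorem pvCnt_getElem_self (T : List Int) (hS : T.Pairwise (· < ·)) (j : Nat) (hj : j < T.length) :
    pvCnt T (T[j]) = j + 1 := by
  have h1 : j < pvCnt T (T[j]) := (pvCnt_iff T hS (T[j]) j hj).1 le_rfl
  have h2 : pvCnt T (T[j]) ≤ j + 1 := by
    by_contra h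
    have hj1 : j + 1 < T.length := lt_of_lt_of_le (by omega) (pvCnt_le_length T (T[j]))
    have hle : T[j+1] ≤ T[j] := (pvCnt_iff T hS (T[j]) (j+1) hj1).2 (by omega)
    have hlt : T[j] < T[j+1] := List.pairwise_iff_getElem.1 hS j (j+1) hj hj1 (by omega)
    omega
  omega

theorem pvCnt_mem (T : List Int) (hS : T.Pairwise (· < ·)) (r : Int) (hr : r ∈ T) :
    0 < pvCnt T r ∧ ∀ (h : pvCnt T r - 1 < T.length), T[pvCnt T r - 1] = r := by
  obtain ⟨j, hj, rfl⟩ := List.mem_iff_getElem.1 hr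
  have := pvCnt_getElem_self T hS j hj
  constructor
  · omega
  · intro h; simp [this]

theorem pvCnt_cons (a : Int) (T : List Int) (r : Int) :
    pvCnt (a :: T) r = (if a ≤ r then 1 else 0) + pvCnt T r := by
  unfold pvCnt
  rw [List.filter_cons]
  by_cases h : a ≤ r
  · rw [if_pos (by simpa using h), if_pos h, List.length_cons]; omega
  · rw [if_neg (by simpa using h), if_neg h]; omega

-- step law: cnt r = cnt (r-1) + [r ∈ T]  (needs distinct elements)
theorem pvCnt_succ (T : List Int) (hnd : T.Nodup) (r : Int) :
    pvCnt T r = pvCnt T (r - 1) + (if r ∈ T then 1 else 0) := by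
  induction T with
  | nil => simp [pvCnt]
  | cons a T ih =>
    have hna : a ∉ T := (List.nodup_cons.1 hnd).1
    have ihT := ih (List.nodup_cons.1 hnd).2
    rw [pvCnt_cons, pvCnt_cons, ihT]
    by_cases hra : r = a
    · subst hra
      rw [if_pos (List.mem_cons_self), if_neg hna, if_pos (le_refl r),
        if_neg (by omega : ¬ r ≤ r - 1)]
      omega
    · have hiff : (r ∈ a :: T) ↔ (r ∈ T) := by
        constructor
        · intro h
          rcases List.mem_cons.1 h with h | h
          · exact absurd h hra
          · exact h
        · exact fun h => List.mem_cons_of_mem a h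
      have hind : (if r ∈ a :: T then (1:Nat) else 0) = (if r ∈ T then 1 else 0) := by
        by_cases hm : r ∈ T
        · rw [if_pos (hiff.2 hm), if_pos hm]
        · rw [if_neg (fun h => hm (hiff.1 h)), if_neg hm]
      rw [hind]
      by_cases hal1 : a ≤ r - 1
      · rw [if_pos (by omega : a ≤ r), if_pos hal1]; omega
      · rw [if_neg (by omega : ¬ a ≤ r), if_neg hal1]; omega

-- ----- facts about pvTones -----

theorem mem_pvTones (scale : List Int) (r : Int) :
    r ∈ pvTones scale ↔ 0 ≤ r ∧ r < 12 ∧ r ∈ scale := by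
  unfold pvTones
  rw [List.mem_map]
  constructor
  · rintro ⟨n, hn, rfl⟩
    rw [List.mem_filter, List.mem_range] at hn
    exact ⟨Int.natCast_nonneg n, by exact_mod_cast hn.1, of_decide_eq_true hn.2⟩
  · rintro ⟨h0, h1, hm⟩
    refine ⟨r.toNat, ?_, Int.toNat_of_nonneg h0⟩
    rw [List.mem_filter, List.mem_range]
    refine ⟨by omega, decide_eq_true ?_⟩
    rwa [Int.toNat_of_nonneg h0]

theorem pvTones_sorted (scale : List Int) : (pvTones scale).Pairwise (· < ·) := by
  unfold pvTones
  refine List.Pairwise.map _ (fun a b h => ?_) (List.Pairwise.filter _ List.pairwise_lt_range)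
  exact_mod_cast h

theorem pvTones_bounds (scale : List Int) : ∀ t ∈ pvTones scale, 0 ≤ t ∧ t < 12 := by
  intro t ht
  have := (mem_pvTones scale t).1 ht
  exact ⟨this.1, this.2.1⟩

-- ----- decomposition lemmas for pvRank / pvToneAt -----

theorem foldl_cnt (T : List Int) (r : Int) : ∀ c0 : Int,
    T.foldl (fun c t => if t ≤ r then c + 1 else c) c0 = c0 + (pvCnt T r : Int) := by
  induction T with
  | nil => intro c0; simp [pvCnt]
  | cons a T ih =>
    intro c0
    by_cases h : a ≤ r <;> simp [pvCnt, List.filter_cons, h, ih] <;> push_cast <;> ring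

theorem floordiv_mod_decomp (p b q r : Int) (hb : 0 < b) (hp : p = b * q + r)
    (h0 : 0 ≤ r) (h1 : r < b) : PySem.Int.floordiv p b = q ∧ PySem.Int.mod p b = r := by
  have hq : PySem.Int.floordiv p b = q := by
    rw [PySem.Int.floordiv_eq_iff_of_pos hb]
    constructor <;> nlinarith
  refine ⟨hq, ?_⟩
  have := PySem.Int.floordiv_mul_add_mod p b
  rw [hq, mul_comm] at this
  omega

theorem pvRank_decomp (T : List Int) (p q r : Int) (hp : p = 12 * q + r)
    (h0 : 0 ≤ r) (h1 : r < 12) :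
    pvRank T (T.length : Int) p = q * (T.length : Int) + (pvCnt T r : Int) := by
  obtain ⟨hq, hr⟩ := floordiv_mod_decomp p 12 q r (by norm_num) hp h0 h1
  simp only [pvRank, hq, hr, foldl_cnt, zero_add]

theorem pvToneAt_decomp (T : List Int) (i q : Int) (r : Nat) (hr : r < T.length)
    (hi : i = (T.length : Int) * q + r) :
    pvToneAt T (T.length : Int) i = 12 * q + T[r] := by
  obtain ⟨hq, hrm⟩ := floordiv_mod_decomp i (T.length : Int) q r
    (by omega) hi (by omega) (by exact_mod_cast hr)
  simp only [pvToneAt, hq, hrm]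
  rw [PySem.List.pyGet?_eq_some_getElem T (by omega) (by exact_mod_cast hr)]
  simp

theorem pv_decomp12 (p : Int) :
    ∃ q r : Int, p = 12 * q + r ∧ 0 ≤ r ∧ r < 12 ∧
      PySem.Int.floordiv p 12 = q ∧ PySem.Int.mod p 12 = r := by
  refine ⟨PySem.Int.floordiv p 12, PySem.Int.mod p 12, ?_, ?_, ?_, rfl, rfl⟩
  · have := PySem.Int.floordiv_mul_add_mod p 12; omega
  · rw [PySem.Int.mod_eq_emod_of_pos (by norm_num)]
    exact Int.emod_nonneg p (by norm_num)
  · rw [PySem.Int.mod_eq_emod_of_pos (by norm_num)]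
    exact Int.emod_lt_of_pos p (by norm_num)

-- ===== the key structural lemmas (T abstract: strictly sorted, in [0,12), nonempty) =====

-- K1: sandwich — p lies between the tones of rank (rank p) and (rank p)+1
theorem pv_sandwich (T : List Int) (hS : T.Pairwise (· < ·))
    (hB : ∀ t ∈ T, 0 ≤ t ∧ t < 12) (hne : T ≠ []) (p : Int) :
    pvToneAt T (T.length : Int) (pvRank T (T.length : Int) p - 1) ≤ p ∧
      p < pvToneAt T (T.length : Int) (pvRank T (T.length : Int) p) := by
  have hk : 0 < T.length := List.length_pos_iff.2 hne
  obtain ⟨q, r, hp, hr0, hr1, hqdef, hrdef⟩ := pv_decomp12 p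
  have hrank : pvRank T (T.length : Int) p = q * (T.length : Int) + (pvCnt T r : Int) :=
    pvRank_decomp T p q r hp hr0 hr1
  have hcle : pvCnt T r ≤ T.length := pvCnt_le_length T r
  constructor
  · -- lower bound
    by_cases hc : 0 < pvCnt T r
    · have hlt : pvCnt T r - 1 < T.length := by omega
      have := pvToneAt_decomp T (pvRank T (T.length : Int) p - 1) q (pvCnt T r - 1) hlt
        (by rw [hrank, Nat.cast_sub (by omega : 1 ≤ pvCnt T r)]; push_cast; ring)
      rw [this]
      have hle : T[pvCnt T r - 1] ≤ r := (pvCnt_iff T hS r _ hlt).2 (by omega)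
      omega
    · have hc0 : pvCnt T r = 0 := by omega
      have hlt : T.length - 1 < T.length := by omega
      have := pvToneAt_decomp T (pvRank T (T.length : Int) p - 1) (q - 1) (T.length - 1) hlt
        (by rw [hrank, hc0, Nat.cast_sub (by omega : 1 ≤ T.length)]; push_cast; ring)
      rw [this]
      have := hB _ (List.getElem_mem hlt)
      omega
  · -- upper bound
    by_cases hc : pvCnt T r < T.length
    · have := pvToneAt_decomp T (pvRank T (T.length : Int) p) q (pvCnt T r) hc
        (by rw [hrank]; push_cast; ring)
      rw [this]
      have hgt : ¬ T[pvCnt T r] ≤ r := by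
        intro h; have := (pvCnt_iff T hS r _ hc).1 h; omega
      omega
    · have hc0 : pvCnt T r = T.length := by omega
      have hlt : 0 < T.length := hk
      have := pvToneAt_decomp T (pvRank T (T.length : Int) p) (q + 1) 0 hlt
        (by rw [hrank, hc0]; push_cast; ring)
      rw [this]
      have := hB _ (List.getElem_mem hlt)
      omega

-- K2: rank of the tone of index i is i+1
theorem pv_decomp_exists (T : List Int) (hne : T ≠ []) (i : Int) :
    ∃ (q : Int) (rn : Nat), rn < T.length ∧ i = (T.length : Int) * q + rn := by
  have hk : 0 < T.length := List.length_pos_iff.2 hne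
  have hkZ : (0:Int) < (T.length : Int) := by exact_mod_cast hk
  have h0 := Int.emod_nonneg i (show (T.length:Int) ≠ 0 by omega)
  have h1 := Int.emod_lt_of_pos i hkZ
  have h2 := Int.ediv_add_emod i (T.length : Int)
  set m := i % (T.length : Int) with hm
  set d := i / (T.length : Int) with hd
  exact ⟨d, m.toNat, by omega, by push_cast; omega⟩

theorem pv_rank_toneAt (T : List Int) (hS : T.Pairwise (· < ·))
    (hB : ∀ t ∈ T, 0 ≤ t ∧ t < 12) (hne : T ≠ []) (i : Int) :
    pvRank T (T.length : Int) (pvToneAt T (T.length : Int) i) = i + 1 := by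
  obtain ⟨q, rn, hrlt, hi⟩ := pv_decomp_exists T hne i
  rw [pvToneAt_decomp T i q rn hrlt hi]
  have hmem := hB _ (List.getElem_mem hrlt)
  rw [pvRank_decomp T (12 * q + T[rn]) q (T[rn]) rfl hmem.1 hmem.2,
    pvCnt_getElem_self T hS rn hrlt]
  have hc : (T.length : Int) * q = q * (T.length : Int) := mul_comm _ _
  push_cast
  omega

-- monotonicity of pvToneAt
theorem pv_toneAt_succ (T : List Int) (hS : T.Pairwise (· < ·))
    (hB : ∀ t ∈ T, 0 ≤ t ∧ t < 12) (hne : T ≠ []) (i : Int) :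
    pvToneAt T (T.length : Int) i < pvToneAt T (T.length : Int) (i + 1) := by
  have hk : 0 < T.length := List.length_pos_iff.2 hne
  obtain ⟨q, rn, hrlt, hi⟩ := pv_decomp_exists T hne i
  rw [pvToneAt_decomp T i q rn hrlt hi]
  by_cases hlast : rn + 1 < T.length
  · rw [pvToneAt_decomp T (i+1) q (rn+1) hlast (by rw [hi]; push_cast; ring)]
    have := List.pairwise_iff_getElem.1 hS rn (rn+1) hrlt hlast (by omega)
    omega
  · have hr_eq : rn = T.length - 1 := by omega
    have hdist : (T.length : Int) * (q + 1) = (T.length : Int) * q + (T.length : Int) := by ring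
    rw [pvToneAt_decomp T (i+1) (q+1) 0 hk (by rw [hi, hr_eq]; push_cast; omega)]
    have h1 := hB _ (List.getElem_mem hrlt)
    have h2 := hB _ (List.getElem_mem hk)
    omega

theorem pv_toneAt_mono (T : List Int) (hS : T.Pairwise (· < ·))
    (hB : ∀ t ∈ T, 0 ≤ t ∧ t < 12) (hne : T ≠ []) {i j : Int} (hij : i ≤ j) :
    pvToneAt T (T.length : Int) i ≤ pvToneAt T (T.length : Int) j := by
  have key : ∀ n : Nat, ∀ i : Int,
      pvToneAt T (T.length : Int) i ≤ pvToneAt T (T.length : Int) (i + n) := by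
    intro n
    induction n with
    | zero => intro i; simp
    | succ n ih =>
      intro i
      have h1 := ih i
      have h2 := pv_toneAt_succ T hS hB hne (i + n)
      have he : i + ((n + 1 : Nat) : Int) = (i + (n : Int)) + 1 := by push_cast; ring
      rw [he]
      omega
  have hj : j = i + ((j - i).toNat : Int) := by omega
  rw [hj]
  exact key _ i

-- K3: the rank step law
theorem pv_rank_step (T : List Int) (hS : T.Pairwise (· < ·))
    (hB : ∀ t ∈ T, 0 ≤ t ∧ t < 12) (p : Int) :
    pvRank T (T.length : Int) p =
      pvRank T (T.length : Int) (p - 1) + (if PySem.Int.mod p 12 ∈ T then 1 else 0) := by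
  have hnd : T.Nodup := hS.nodup
  obtain ⟨q, r, hp, hr0, hr1, hqdef, hrdef⟩ := pv_decomp12 p
  rw [hrdef, pvRank_decomp T p q r hp hr0 hr1]
  have hstep := pvCnt_succ T hnd r
  by_cases hzero : r = 0
  · -- octave boundary: p - 1 = 12(q-1) + 11
    rw [pvRank_decomp T (p-1) (q-1) 11 (by omega) (by norm_num) (by norm_num)]
    have hall : pvCnt T 11 = T.length := by
      unfold pvCnt
      rw [List.filter_eq_self.2 (fun t ht => decide_eq_true (by have := (hB t ht).2; omega))]
    have hneg : pvCnt T (-1) = 0 := by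
      unfold pvCnt
      rw [List.filter_eq_nil_iff.2 (fun t ht => by have := (hB t ht).1; simp; omega)]
      rfl
    have h0 : pvCnt T 0 = (if (0:Int) ∈ T then 1 else 0) := by
      have := pvCnt_succ T hnd 0
      simpa [hneg] using this
    subst hzero
    rw [hall, h0]
    by_cases hm : (0:Int) ∈ T <;> simp [hm] <;> push_cast <;> ring
  · rw [pvRank_decomp T (p-1) q (r-1) (by omega) (by omega) (by omega)]
    rw [hstep]
    by_cases hm : r ∈ T <;> simp [hm] <;> push_cast <;> ring

-- K4: membership characterization
theorem pv_isTone_iff (T : List Int) (hS : T.Pairwise (· < ·))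
    (hB : ∀ t ∈ T, 0 ≤ t ∧ t < 12) (hne : T ≠ []) (p : Int) :
    PySem.Int.mod p 12 ∈ T ↔
      pvToneAt T (T.length : Int) (pvRank T (T.length : Int) p - 1) = p := by
  have hk : 0 < T.length := List.length_pos_iff.2 hne
  obtain ⟨q, r, hp, hr0, hr1, hqdef, hrdef⟩ := pv_decomp12 p
  have hrank : pvRank T (T.length : Int) p = q * (T.length : Int) + (pvCnt T r : Int) :=
    pvRank_decomp T p q r hp hr0 hr1
  rw [hrdef]
  constructor
  · intro hmem
    obtain ⟨hc, heq⟩ := pvCnt_mem T hS r hmem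
    have hlt : pvCnt T r - 1 < T.length := by
      have := pvCnt_le_length T r; omega
    rw [pvToneAt_decomp T _ q (pvCnt T r - 1) hlt
      (by rw [hrank, Nat.cast_sub (by omega : 1 ≤ pvCnt T r)]; push_cast; ring)]
    rw [heq hlt]
    omega
  · intro heq
    by_cases hc : 0 < pvCnt T r
    · have hlt : pvCnt T r - 1 < T.length := by
        have := pvCnt_le_length T r; omega
      rw [pvToneAt_decomp T _ q (pvCnt T r - 1) hlt
        (by rw [hrank, Nat.cast_sub (by omega : 1 ≤ pvCnt T r)]; push_cast; ring)] at heq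
      have : T[pvCnt T r - 1] = r := by omega
      rw [← this]
      exact List.getElem_mem hlt
    · exfalso
      have hc0 : pvCnt T r = 0 := by omega
      have hlt : T.length - 1 < T.length := by omega
      rw [pvToneAt_decomp T _ (q - 1) (T.length - 1) hlt
        (by rw [hrank, hc0, Nat.cast_sub (by omega : 1 ≤ T.length)]; push_cast; ring)] at heq
      have := hB _ (List.getElem_mem hlt)
      omega

-- K6: octave shift
theorem pv_rank_octave (T : List Int) (p : Int) :
    pvRank T (T.length : Int) (p + 12) = pvRank T (T.length : Int) p + (T.length : Int) := by
  obtain ⟨q, r, hp, hr0, hr1, hqdef, hrdef⟩ := pv_decomp12 p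
  rw [pvRank_decomp T p q r hp hr0 hr1,
     pvRank_decomp T (p+12) (q+1) r (by omega) hr0 hr1]
  ring

-- gap bounds
theorem pv_gap_up (T : List Int) (hS : T.Pairwise (· < ·))
    (hB : ∀ t ∈ T, 0 ≤ t ∧ t < 12) (hne : T ≠ []) (p : Int) :
    p < pvToneAt T (T.length : Int) (pvRank T (T.length : Int) p) ∧
      pvToneAt T (T.length : Int) (pvRank T (T.length : Int) p) ≤ p + 12 := by
  have hk : 0 < T.length := List.length_pos_iff.2 hne
  refine ⟨(pv_sandwich T hS hB hne p).2, ?_⟩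
  have h12 := (pv_sandwich T hS hB hne (p + 12)).1
  rw [pv_rank_octave T p] at h12
  have hmono := pv_toneAt_mono T hS hB hne
    (i := pvRank T (T.length : Int) p)
    (j := pvRank T (T.length : Int) p + (T.length : Int) - 1) (by omega)
  omega

theorem pv_gap_down (T : List Int) (hS : T.Pairwise (· < ·))
    (hB : ∀ t ∈ T, 0 ≤ t ∧ t < 12) (hne : T ≠ []) (p : Int) :
    pvToneAt T (T.length : Int) (pvRank T (T.length : Int) p - 1) ≤ p ∧
      p - 12 < pvToneAt T (T.length : Int) (pvRank T (T.length : Int) p - 1) := by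
  have hk : 0 < T.length := List.length_pos_iff.2 hne
  refine ⟨(pv_sandwich T hS hB hne p).1, ?_⟩
  have h12 := (pv_sandwich T hS hB hne (p - 12)).2
  have hoct := pv_rank_octave T (p - 12)
  have hoct' : pvRank T (T.length : Int) (p - 12) =
      pvRank T (T.length : Int) p - (T.length : Int) := by
    rw [show p - 12 + 12 = p by ring] at hoct; omega
  rw [hoct'] at h12
  have hmono := pv_toneAt_mono T hS hB hne
    (i := pvRank T (T.length : Int) p - (T.length : Int))
    (j := pvRank T (T.length : Int) p - 1) (by omega)
  omega

-- trivial loop fact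
theorem pvLoopA_zero (scale : List Int) (sg : Int) (fuel : Nat) (p : Int) :
    pvLoopA scale sg fuel p 0 = p := by
  cases fuel <;> simp [pvLoopA]

-- bridging: the loop's membership test against the tone list
theorem pv_mem_scale_iff (scale : List Int) (p : Int) :
    PySem.Int.mod p 12 ∈ scale ↔ PySem.Int.mod p 12 ∈ pvTones scale := by
  have hr0 : (0:Int) ≤ PySem.Int.mod p 12 := by
    rw [PySem.Int.mod_eq_emod_of_pos (a := p) (b := 12) (by norm_num)]
    exact Int.emod_nonneg p (by norm_num)
  have hr1 : PySem.Int.mod p 12 < 12 := by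
    rw [PySem.Int.mod_eq_emod_of_pos (a := p) (b := 12) (by norm_num)]
    exact Int.emod_lt_of_pos p (by norm_num)
  rw [mem_pvTones]
  tauto

-- ===== the hop lemmas: the loop jumps to the adjacent scale tone =====

theorem pv_hop_up (scale : List Int) (d : Nat) :
    ∀ (p s : Int) (fuel : Nat), s ≠ 0 →
    pvToneAt (pvTones scale) ((pvTones scale).length : Int)
        (pvRank (pvTones scale) ((pvTones scale).length : Int) p) = p + (d + 1) →
    (pvTones scale) ≠ [] →
    d + 1 ≤ fuel →
    pvLoopA scale 1 fuel p s = pvLoopA scale 1 (fuel - (d + 1)) (p + (d + 1)) (s - 1) := by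
  set T := pvTones scale with hT
  have hS := pvTones_sorted scale
  have hB := pvTones_bounds scale
  induction d with
  | zero =>
    intro p s fuel hs htone hne hfuel
    obtain ⟨f, rfl⟩ : ∃ f, fuel = f + 1 := ⟨fuel - 1, by omega⟩
    rw [pvLoopA]
    rw [if_neg hs]
    have hmem : PySem.Int.mod (p + 1) 12 ∈ scale := by
      rw [pv_mem_scale_iff scale (p+1), ← hT]
      rw [pv_isTone_iff T hS hB hne (p + 1)]
      by_cases hmem : PySem.Int.mod (p+1) 12 ∈ T
      · rwa [pv_isTone_iff T hS hB hne (p + 1)] at hmem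
      · exfalso
        have hstep := pv_rank_step T hS hB (p + 1)
        rw [if_neg hmem, add_zero] at hstep
        have hsp : p + 1 - 1 = p := by ring
        rw [hsp] at hstep
        have hsw := (pv_sandwich T hS hB hne (p + 1)).2
        rw [hstep] at hsw
        omega
    simp only [hmem, if_pos]
    norm_num
  | succ d ih =>
    intro p s fuel hs htone hne hfuel
    obtain ⟨f, rfl⟩ : ∃ f, fuel = f + 1 := ⟨fuel - 1, by omega⟩
    rw [pvLoopA]
    rw [if_neg hs]
    have hnm : ¬ PySem.Int.mod (p + 1) 12 ∈ T := by
      intro hmem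
      rw [pv_isTone_iff T hS hB hne (p + 1)] at hmem
      have hstep := pv_rank_step T hS hB (p + 1)
      rw [if_pos (by rw [pv_isTone_iff T hS hB hne (p + 1)]; exact hmem)] at hstep
      have hsp : p + 1 - 1 = p := by ring
      rw [hsp] at hstep
      rw [hstep] at hmem
      have : pvRank T (T.length : Int) p + 1 - 1 = pvRank T (T.length : Int) p := by ring
      rw [this] at hmem
      rw [htone] at hmem
      omega
    have hnm' : ¬ PySem.Int.mod (p + 1) 12 ∈ scale := by
      rw [pv_mem_scale_iff scale (p+1), ← hT]; exact hnm
    simp only [hnm', if_neg, if_false]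
    have hstep := pv_rank_step T hS hB (p + 1)
    rw [if_neg hnm, add_zero] at hstep
    have hsp : p + 1 - 1 = p := by ring
    rw [hsp] at hstep
    have ih' := ih (p + 1) s f hs (by rw [hstep, htone]; push_cast; ring) hne (by omega)
    rw [ih']
    congr 1
    · omega
    · push_cast; ring

theorem pv_hop_down (scale : List Int) (d : Nat) :
    ∀ (p s : Int) (fuel : Nat), s ≠ 0 →
    pvToneAt (pvTones scale) ((pvTones scale).length : Int)
        (pvRank (pvTones scale) ((pvTones scale).length : Int) (p - 1) - 1) = p - (d + 1) →
    (pvTones scale) ≠ [] →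
    d + 1 ≤ fuel →
    pvLoopA scale (-1) fuel p s = pvLoopA scale (-1) (fuel - (d + 1)) (p - (d + 1)) (s + 1) := by
  set T := pvTones scale with hT
  have hS := pvTones_sorted scale
  have hB := pvTones_bounds scale
  induction d with
  | zero =>
    intro p s fuel hs htone hne hfuel
    obtain ⟨f, rfl⟩ : ∃ f, fuel = f + 1 := ⟨fuel - 1, by omega⟩
    rw [pvLoopA]
    rw [if_neg hs]
    have hmem : PySem.Int.mod (p + -1) 12 ∈ scale := by
      rw [pv_mem_scale_iff scale (p + -1), ← hT]
      rw [pv_isTone_iff T hS hB hne (p + -1)]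
      have : p + -1 = p - 1 := by ring
      rw [this, htone]
      push_cast; ring
    simp only [hmem, if_pos]
    have h1 : s - -1 = s + 1 := by ring
    rw [h1, show p + -1 = p - 1 by ring]
    norm_num
  | succ d ih =>
    intro p s fuel hs htone hne hfuel
    obtain ⟨f, rfl⟩ : ∃ f, fuel = f + 1 := ⟨fuel - 1, by omega⟩
    rw [pvLoopA]
    rw [if_neg hs]
    have hnm : ¬ PySem.Int.mod (p + -1) 12 ∈ T := by
      intro hmem
      rw [pv_isTone_iff T hS hB hne (p + -1)] at hmem
      have : p + -1 = p - 1 := by ring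
      rw [this] at hmem
      rw [htone] at hmem
      push_cast at hmem
      omega
    have hnm' : ¬ PySem.Int.mod (p + -1) 12 ∈ scale := by
      rw [pv_mem_scale_iff scale (p + -1), ← hT]; exact hnm
    simp only [hnm', if_neg, if_false]
    have hstep := pv_rank_step T hS hB (p - 1)
    rw [if_neg (by rwa [show p - 1 = p + -1 by ring]), add_zero] at hstep
    have ih' := ih (p - 1) s f hs ?_ hne (by omega)
    · rw [show p + -1 = p - 1 by ring, ih']
      congr 1
      · omega
      · push_cast; ring
    · rw [← hstep, htone]
      push_cast; ring

-- ===== the main loop characterizations =====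

theorem pv_main_up (scale : List Int) (hne : pvTones scale ≠ []) (n : Nat) :
    ∀ (p : Int) (fuel : Nat), 12 * (n + 1) ≤ fuel →
    pvLoopA scale 1 fuel p ((n : Int) + 1) =
      pvToneAt (pvTones scale) ((pvTones scale).length : Int)
        (pvRank (pvTones scale) ((pvTones scale).length : Int) p + n) := by
  set T := pvTones scale with hT
  have hS := pvTones_sorted scale
  have hB := pvTones_bounds scale
  induction n with
  | zero =>
    intro p fuel hfuel
    norm_num
    obtain ⟨hlo, hhi⟩ := pv_gap_up T hS hB hne p
    set t := pvToneAt T (T.length : Int) (pvRank T (T.length : Int) p) with ht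
    set d : Nat := (t - p - 1).toNat with hd
    have htone : t = p + ((d : Int) + 1) := by omega
    have hfd : d + 1 ≤ fuel := by omega
    rw [pv_hop_up scale d p 1 fuel (by norm_num) htone hne hfd]
    norm_num
    rw [pvLoopA_zero]
    omega
  | succ n ih =>
    intro p fuel hfuel
    obtain ⟨hlo, hhi⟩ := pv_gap_up T hS hB hne p
    set t := pvToneAt T (T.length : Int) (pvRank T (T.length : Int) p) with ht
    set d : Nat := (t - p - 1).toNat with hd
    have htone : t = p + ((d : Int) + 1) := by omega
    have hfd : d + 1 ≤ fuel := by omega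
    have hs : ((n : Int) + 1) + 1 ≠ 0 := by push_cast; omega
    rw [show (((n + 1 : Nat) : Int) + 1) = ((n : Int) + 1) + 1 by push_cast; ring]
    rw [pv_hop_up scale d p (((n : Int) + 1) + 1) fuel hs (by rw [← ht, htone]) hne hfd]
    have hstep : ((n : Int) + 1) + 1 - 1 = (n : Int) + 1 := by ring
    rw [hstep, show p + ((d : Int) + 1) = t by omega]
    rw [ih t (fuel - (d + 1)) (by omega)]
    congr 1
    rw [ht, pv_rank_toneAt T hS hB hne]
    push_cast
    ring

theorem pv_main_down (scale : List Int) (hne : pvTones scale ≠ []) (n : Nat) :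
    ∀ (p : Int) (fuel : Nat), 12 * (n + 1) ≤ fuel →
    pvLoopA scale (-1) fuel p (-(n : Int) - 1) =
      pvToneAt (pvTones scale) ((pvTones scale).length : Int)
        (pvRank (pvTones scale) ((pvTones scale).length : Int) (p - 1) - ((n : Int) + 1)) := by
  set T := pvTones scale with hT
  have hS := pvTones_sorted scale
  have hB := pvTones_bounds scale
  induction n with
  | zero =>
    intro p fuel hfuel
    norm_num
    obtain ⟨hhi, hlo⟩ := pv_gap_down T hS hB hne (p - 1)
    set t := pvToneAt T (T.length : Int) (pvRank T (T.length : Int) (p - 1) - 1) with ht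
    set d : Nat := (p - t - 1).toNat with hd
    have htone : t = p - ((d : Int) + 1) := by omega
    have hfd : d + 1 ≤ fuel := by omega
    rw [pv_hop_down scale d p (-1) fuel (by norm_num) htone hne hfd]
    norm_num
    rw [pvLoopA_zero]
    omega
  | succ n ih =>
    intro p fuel hfuel
    obtain ⟨hhi, hlo⟩ := pv_gap_down T hS hB hne (p - 1)
    set t := pvToneAt T (T.length : Int) (pvRank T (T.length : Int) (p - 1) - 1) with ht
    set d : Nat := (p - t - 1).toNat with hd
    have htone : t = p - ((d : Int) + 1) := by omega
    have hfd : d + 1 ≤ fuel := by omega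
    have hs : -((n + 1 : Nat) : Int) - 1 ≠ 0 := by push_cast; omega
    rw [pv_hop_down scale d p (-((n + 1 : Nat) : Int) - 1) fuel hs (by rw [← ht, htone]) hne hfd]
    have hstep : -((n + 1 : Nat) : Int) - 1 + 1 = -(n : Int) - 1 := by push_cast; ring
    rw [hstep, show p - ((d : Int) + 1) = t by omega]
    rw [ih t (fuel - (d + 1)) (by omega)]
    -- t is a tone, so rank (t - 1) = rank (p-1) - 1
    have hrt : pvRank T (T.length : Int) t = pvRank T (T.length : Int) (p - 1) := by
      rw [ht, pv_rank_toneAt T hS hB hne]; ring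
    have hmem : PySem.Int.mod t 12 ∈ T := by
      rw [pv_isTone_iff T hS hB hne t, hrt, ← ht]
    have hstep2 := pv_rank_step T hS hB t
    rw [if_pos hmem] at hstep2
    congr 1
    rw [hstep2] at hrt
    push_cast
    omega

-- ===== final assembly =====

theorem move_in_scale_spec : Claim_equal_move_in_scale := by
  intro sp scale step _hdom hpre
  obtain ⟨hstep, r, hr, hmem⟩ := hpre
  unfold Spec_move_in_scale
  have hne : pvTones scale ≠ [] := by
    intro hnil
    have : (r : Int) ∈ pvTones scale := by
      rw [mem_pvTones]
      exact ⟨by omega, by exact_mod_cast List.mem_range.1 hr, hmem⟩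
    simp [hnil] at this
  by_cases hpos : 0 < step
  · set n : Nat := (step - 1).toNat with hn
    have hstepn : step = (n : Int) + 1 := by omega
    have habs : step.natAbs = n + 1 := by omega
    rw [move_in_scale, move_in_scale_alt]
    simp only [if_pos hpos, habs]
    rw [hstepn]
    rw [pv_main_up scale hne n sp (12 * (n + 1) + 1) (by omega)]
    congr 1
    ring
  · have hneg : step < 0 := by omega
    set n : Nat := (-step - 1).toNat with hn
    have hstepn : step = -(n : Int) - 1 := by omega
    have habs : step.natAbs = n + 1 := by omega
    rw [move_in_scale, move_in_scale_alt]
    simp only [if_neg hpos, habs]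
    rw [hstepn]
    rw [pv_main_down scale hne n sp (12 * (n + 1) + 1) (by omega)]
    congr 1
    ring
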